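-- pv_equiv track=rewrite | github.com/PuriSeth/forestareacalculator | forest_area.py | process_test_case
-- ===== SOURCE A (Python) =====
-- def process_test_case(n, m, grid):
--     # Initialize the variables
--     total_area = 0
--     max_single_cell = 0
--
--     # Iterate over the rows and columns of the grid
--     for i in range(n):
--         for j in range(m):
--             # If the cell is a tree, compute the area of its forest
--             if grid[i][j] == "T":
--                 area = compute_forest_area(i, j, n, m, grid)
--                 total_area += area
--
--                 # Update the maximum single cell area
--                 if area > max_single_cell:
--                     max_single_cell = area
--
--     return "{} {}".format(total_area, max_single_cell)
--
-- def compute_forest_area(i, j, n, m, grid):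
--     # Check if the cell is outside the grid or not a tree
--     if i < 0 or i >= n or j < 0 or j >= m or grid[i][j] != "T":
--         return 0
--
--     # Mark the cell as visited
--     grid[i][j] = "V"
--
--     # Compute the size of the forest by adding 1 (for the current cell)
--     # and the size of the forests in the adjacent cells
--     size = 1 + compute_forest_area(i - 1, j, n, m, grid)
--     size += compute_forest_area(i + 1, j, n, m, grid)
--     size += compute_forest_area(i, j - 1, n, m, grid)
--     size += compute_forest_area(i, j + 1, n, m, grid)
--
--     return size
-- ===== SOURCE B (Python) =====
-- def process_test_case(n, m, grid):
--     total_area = 0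
--     max_single_cell = 0
--     for i in range(n):
--         for j in range(m):
--             if grid[i][j] == "T":
--                 # iterative flood fill with an explicit stack
--                 area = 0
--                 stack = [(i, j)]
--                 while stack:
--                     r, c = stack.pop()
--                     if 0 <= r < n and 0 <= c < m and grid[r][c] == "T":
--                         grid[r][c] = "V"
--                         area += 1
--                         stack.extend([(r, c + 1), (r, c - 1), (r + 1, c), (r - 1, c)])
--                 total_area += area
--                 if area > max_single_cell:
--                     max_single_cell = area
--     return "{} {}".format(total_area, max_single_cell)
-- ===== Notes on version B (the rewrite author's own statement) =====
-- stated objective: idiomatic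
-- what changed: A's recursive flood fill (one recursion level per cell, four recursive calls each) is replaced by an iterative flood fill with an explicit stack, the way an experienced developer writes it to avoid Python's recursion-depth limit; the outer scan, in-place marking and output format are unchanged.
import Mathlib
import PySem

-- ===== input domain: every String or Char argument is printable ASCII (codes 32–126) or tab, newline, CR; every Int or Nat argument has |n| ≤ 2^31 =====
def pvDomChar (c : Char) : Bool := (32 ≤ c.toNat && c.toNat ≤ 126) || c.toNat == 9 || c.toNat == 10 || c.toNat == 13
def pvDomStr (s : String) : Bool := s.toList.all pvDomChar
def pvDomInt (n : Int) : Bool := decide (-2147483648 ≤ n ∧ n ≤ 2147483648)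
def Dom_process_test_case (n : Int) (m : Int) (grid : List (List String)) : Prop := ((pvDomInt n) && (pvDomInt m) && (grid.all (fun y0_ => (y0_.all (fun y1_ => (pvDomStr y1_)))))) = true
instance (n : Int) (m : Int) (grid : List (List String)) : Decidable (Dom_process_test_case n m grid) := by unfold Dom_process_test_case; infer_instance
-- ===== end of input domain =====

-- B replaces A's recursive flood fill by an iterative stack-based flood fill (same in-place
-- grid mutation as A; the equivalence proved here is about the return value).

-- cell read grid[i][j] (used only after the 0 ≤ i < n, 0 ≤ j < m bound checks; reads outside
-- the actual grid default to "", which is never "T" — exact on Pre_)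
def pvCell (g : List (List String)) (i j : Int) : String :=
  (PySem.List.pyGet? ((PySem.List.pyGet? g i).getD []) j).getD ""

-- in-place write grid[i][j] = "V"
def pvMark (g : List (List String)) (i j : Int) : List (List String) :=
  g.modify i.toNat (fun row => row.set j.toNat "V")

-- number of "T" cells (termination measure / fuel bound; not part of either Python's data)
def pvTcount (g : List (List String)) : Nat :=
  (g.map (fun row => row.count "T")).sum

theorem pvTcount_cons (r : List String) (t : List (List String)) :
    pvTcount (r :: t) = r.count "T" + pvTcount t := by
  simp [pvTcount]

-- lemmas the stack loop's termination argument cites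
theorem pv_modify_zero (r : List String) (t : List (List String)) (f : List String → List String) :
    (r :: t).modify 0 f = f r :: t := rfl

theorem pv_modify_succ (r : List String) (t : List (List String)) (k : Nat)
    (f : List String → List String) :
    (r :: t).modify (k + 1) f = r :: t.modify k f := rfl

theorem pv_count_set_V_eq (l : List String) (k : Nat) (h : l[k]? = some "T") :
    (l.set k "V").count "T" + 1 = l.count "T" := by
  obtain ⟨hk, hget⟩ := List.getElem?_eq_some_iff.1 h
  have hpos : 0 < l.count "T" := List.count_pos_iff.2 (hget ▸ List.getElem_mem hk)
  rw [List.count_set hk, hget]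
  simp
  omega

theorem pvCell_eq_T (g : List (List String)) (i j : Int) (hi : 0 ≤ i) (hj : 0 ≤ j)
    (h : pvCell g i j = "T") :
    ∃ row, g[i.toNat]? = some row ∧ row[j.toNat]? = some "T" := by
  unfold pvCell at h
  rw [PySem.List.pyGet?_of_nonneg g hi] at h
  cases hrow : g[i.toNat]? with
  | none => rw [hrow] at h; simp [PySem.List.pyGet?] at h
  | some row =>
    rw [hrow] at h
    rw [Option.getD_some, PySem.List.pyGet?_of_nonneg row hj] at h
    cases hc : row[j.toNat]? with
    | none => rw [hc] at h; simp at h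
    | some s => rw [hc, Option.getD_some] at h; exact ⟨row, rfl, h ▸ hc⟩

theorem pvTcount_modify_eq (g : List (List String)) (k : Nat) (c : Nat) (row : List String)
    (hrow : g[k]? = some row) (hcell : row[c]? = some "T") :
    pvTcount (g.modify k (fun r => r.set c "V")) + 1 = pvTcount g := by
  induction g generalizing k with
  | nil => simp at hrow
  | cons r t ih =>
    cases k with
    | zero =>
      simp only [List.getElem?_cons_zero, Option.some.injEq] at hrow
      subst hrow
      rw [pv_modify_zero, pvTcount_cons, pvTcount_cons]
      have := pv_count_set_V_eq r c hcell
      omega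
    | succ k =>
      simp only [List.getElem?_cons_succ] at hrow
      rw [pv_modify_succ, pvTcount_cons, pvTcount_cons]
      have := ih k hrow
      omega

theorem pvTcount_mark_eq (g : List (List String)) (i j : Int) (hi : 0 ≤ i) (hj : 0 ≤ j)
    (h : pvCell g i j = "T") :
    pvTcount (pvMark g i j) + 1 = pvTcount g := by
  obtain ⟨row, hrow, hcell⟩ := pvCell_eq_T g i j hi hj h
  exact pvTcount_modify_eq g i.toNat j.toNat row hrow hcell

-- ===== PORT A =====
-- compute_forest_area, with a fuel guard making the recursion structural; the caller passes
-- fuel = pvTcount grid + 1, which is never exhausted (each level consumes one "T" cell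
-- before recursing, so the depth is bounded by the number of "T" cells).
def pvComputeA (i j n m : Int) (g : List (List String)) : Nat → Int × List (List String)
  | 0 => (0, g)
  | f + 1 =>
    if i < 0 ∨ n ≤ i ∨ j < 0 ∨ m ≤ j ∨ pvCell g i j ≠ "T" then (0, g)
    else
      let g0 := pvMark g i j
      let r1 := pvComputeA (i - 1) j n m g0 f
      let r2 := pvComputeA (i + 1) j n m r1.2 f
      let r3 := pvComputeA i (j - 1) n m r2.2 f
      let r4 := pvComputeA i (j + 1) n m r3.2 f
      (1 + r1.1 + r2.1 + r3.1 + r4.1, r4.2)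

def process_test_case (n : Int) (m : Int) (grid : List (List String)) : String :=
  let r :=
    (PySem.List.pyRange 0 n 1).foldl (fun st i =>
      (PySem.List.pyRange 0 m 1).foldl (fun st j =>
        if pvCell st.2.2 i j = "T" then
          let res := pvComputeA i j n m st.2.2 (pvTcount st.2.2 + 1)
          (st.1 + res.1, if res.1 > st.2.1 then res.1 else st.2.1, res.2)
        else st) st)
      ((0 : Int), (0 : Int), grid)
  PySem.Int.toStr r.1 ++ " " ++ PySem.Int.toStr r.2.1

-- ===== PORT B =====
-- the while-loop: pop (r,c) from the stack (list head = top of the Python stack); if it is an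
-- in-bounds "T", mark it, count it and push the four neighbours (Python's extend of
-- [right, left, down, up] makes them pop in the order up, down, left, right)
def pvLoop (n m : Int) (stack : List (Int × Int)) (g : List (List String)) (area : Int) :
    Int × List (List String) :=
  match stack with
  | [] => (area, g)
  | (r, c) :: st =>
    if h : 0 ≤ r ∧ r < n ∧ 0 ≤ c ∧ c < m ∧ pvCell g r c = "T" then
      pvLoop n m ((r - 1, c) :: (r + 1, c) :: (r, c - 1) :: (r, c + 1) :: st)
        (pvMark g r c) (area + 1)
    else
      pvLoop n m st g area
  termination_by 5 * pvTcount g + stack.length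
  decreasing_by
  · have := pvTcount_mark_eq g r c h.1 h.2.2.1 h.2.2.2.2
    simp only [List.length_cons]
    omega
  · simp only [List.length_cons]; omega

def process_test_case_alt (n : Int) (m : Int) (grid : List (List String)) : String :=
  let r :=
    (PySem.List.pyRange 0 n 1).foldl (fun st i =>
      (PySem.List.pyRange 0 m 1).foldl (fun st j =>
        if pvCell st.2.2 i j = "T" then
          let res := pvLoop n m [(i, j)] st.2.2 0
          (st.1 + res.1, if res.1 > st.2.1 then res.1 else st.2.1, res.2)
        else st) st)
      ((0 : Int), (0 : Int), grid)
  PySem.Int.toStr r.1 ++ " " ++ PySem.Int.toStr r.2.1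

-- ===== PRECONDITION & SPEC =====
-- Pre_ = exactly the inputs where Python A returns (no IndexError): grid[i][j] is indexed for
-- all 0 ≤ i < n, 0 ≤ j < m and only those cells, so when both n and m are positive the grid
-- needs at least n rows and each of its first n rows at least m cells.
def Pre_process_test_case (n : Int) (m : Int) (grid : List (List String)) : Prop :=
  (0 < n ∧ 0 < m) → (n ≤ grid.length ∧ ∀ row ∈ grid.take n.toNat, m ≤ row.length)
instance (n : Int) (m : Int) (grid : List (List String)) : Decidable (Pre_process_test_case n m grid) := by unfold Pre_process_test_case; infer_instance

def pvWitness_process_test_case : Int × Int × List (List String) :=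
  (1, 2, [["T", "T"]])

def Spec_process_test_case (n : Int) (m : Int) (grid : List (List String)) (out : String) : Prop := out = process_test_case_alt n m grid
instance (n : Int) (m : Int) (grid : List (List String)) (out : String) : Decidable (Spec_process_test_case n m grid out) := by unfold Spec_process_test_case; infer_instance

-- ===== CLAIM (what is proved, stated in full; the proofs are below) =====
def Claim_equal_process_test_case : Prop := ∀ (n : Int) (m : Int) (grid : List (List String)), Dom_process_test_case n m grid → Pre_process_test_case n m grid → Spec_process_test_case n m grid (process_test_case n m grid)

-- ===== LEMMAS AND PROOFS =====

theorem pv_count_set_V_le (l : List String) (k : Nat) :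
    (l.set k "V").count "T" ≤ l.count "T" := by
  by_cases hk : k < l.length
  · rw [List.count_set hk]
    simp
  · rw [List.set_eq_of_length_le (Nat.le_of_not_lt hk)]

theorem pvTcount_mark_le (g : List (List String)) (i j : Int) :
    pvTcount (pvMark g i j) ≤ pvTcount g := by
  unfold pvMark
  generalize i.toNat = k
  induction g generalizing k with
  | nil => simp [List.modify_nil]
  | cons r t ih =>
    cases k with
    | zero =>
      rw [pv_modify_zero, pvTcount_cons, pvTcount_cons]
      have := pv_count_set_V_le r j.toNat
      omega
    | succ k =>
      rw [pv_modify_succ, pvTcount_cons, pvTcount_cons]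
      have := ih k
      omega

theorem pvTcount_computeA_le (n m : Int) (f : Nat) :
    ∀ (i j : Int) (g : List (List String)),
      pvTcount (pvComputeA i j n m g f).2 ≤ pvTcount g := by
  induction f with
  | zero => intro i j g; simp [pvComputeA]
  | succ f ih =>
    intro i j g
    rw [pvComputeA]
    split
    · exact le_rfl
    · dsimp only
      exact le_trans (ih _ _ _) (le_trans (ih _ _ _) (le_trans (ih _ _ _)
        (le_trans (ih _ _ _) (pvTcount_mark_le g i j))))

theorem pvLoop_nil (n m : Int) (g : List (List String)) (a : Int) :
    pvLoop n m [] g a = (a, g) := by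
  rw [pvLoop]

-- the key bridge: one stack entry on top of the stack behaves like one recursive call of A,
-- provided the fuel exceeds the number of "T" cells
theorem pv_bridge (n m : Int) (f : Nat) :
    ∀ (i j : Int) (g : List (List String)) (st : List (Int × Int)) (a : Int),
      pvTcount g < f →
      pvLoop n m ((i, j) :: st) g a =
        pvLoop n m st (pvComputeA i j n m g f).2 (a + (pvComputeA i j n m g f).1) := by
  induction f with
  | zero => intro i j g st a h; exact absurd h (Nat.not_lt_zero _)
  | succ f ih =>
    intro i j g st a h
    rw [pvLoop]
    by_cases hc : 0 ≤ i ∧ i < n ∧ 0 ≤ j ∧ j < m ∧ pvCell g i j = "T"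
    · rw [dif_pos hc]
      have hcond : ¬(i < 0 ∨ n ≤ i ∨ j < 0 ∨ m ≤ j ∨ pvCell g i j ≠ "T") := by
        obtain ⟨h1, h2, h3, h4, h5⟩ := hc
        intro hor
        rcases hor with h' | h' | h' | h' | h' <;> first | omega | exact h' h5
      rw [pvComputeA, if_neg hcond]
      dsimp only
      have hg0 : pvTcount (pvMark g i j) < f := by
        have := pvTcount_mark_eq g i j hc.1 hc.2.2.1 hc.2.2.2.2
        omega
      rw [ih (i - 1) j (pvMark g i j) _ (a + 1) hg0]
      have h1 : pvTcount (pvComputeA (i - 1) j n m (pvMark g i j) f).2 < f :=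
        lt_of_le_of_lt (pvTcount_computeA_le n m f _ _ _) hg0
      rw [ih (i + 1) j _ _ _ h1]
      have h2 : pvTcount (pvComputeA (i + 1) j n m
          (pvComputeA (i - 1) j n m (pvMark g i j) f).2 f).2 < f :=
        lt_of_le_of_lt (pvTcount_computeA_le n m f _ _ _) h1
      rw [ih i (j - 1) _ _ _ h2]
      have h3 : pvTcount (pvComputeA i (j - 1) n m (pvComputeA (i + 1) j n m
          (pvComputeA (i - 1) j n m (pvMark g i j) f).2 f).2 f).2 < f :=
        lt_of_le_of_lt (pvTcount_computeA_le n m f _ _ _) h2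
      rw [ih i (j + 1) _ _ _ h3]
      congr 1
      ring
    · rw [dif_neg hc]
      have hcond : i < 0 ∨ n ≤ i ∨ j < 0 ∨ m ≤ j ∨ pvCell g i j ≠ "T" := by
        by_contra hN
        push Not at hN
        exact hc ⟨by omega, by omega, by omega, by omega, hN.2.2.2.2⟩
      rw [pvComputeA, if_pos hcond]
      dsimp only
      rw [add_zero]

-- ===== VERDICT (by name: the statement is the Claim_ definition above) =====
theorem process_test_case_spec : Claim_equal_process_test_case := by
  intro n m grid _ _
  unfold Spec_process_test_case process_test_case process_test_case_alt
  dsimp only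
  have hstep : (fun (st : Int × Int × List (List String)) (i : Int) =>
      (PySem.List.pyRange 0 m 1).foldl (fun st j =>
        if pvCell st.2.2 i j = "T" then
          let res := pvComputeA i j n m st.2.2 (pvTcount st.2.2 + 1)
          (st.1 + res.1, if res.1 > st.2.1 then res.1 else st.2.1, res.2)
        else st) st)
    = (fun (st : Int × Int × List (List String)) (i : Int) =>
      (PySem.List.pyRange 0 m 1).foldl (fun st j =>
        if pvCell st.2.2 i j = "T" then
          let res := pvLoop n m [(i, j)] st.2.2 0
          (st.1 + res.1, if res.1 > st.2.1 then res.1 else st.2.1, res.2)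
        else st) st) := by
    funext st i
    have hinner : (fun (st : Int × Int × List (List String)) (j : Int) =>
        if pvCell st.2.2 i j = "T" then
          let res := pvComputeA i j n m st.2.2 (pvTcount st.2.2 + 1)
          (st.1 + res.1, if res.1 > st.2.1 then res.1 else st.2.1, res.2)
        else st)
      = (fun (st : Int × Int × List (List String)) (j : Int) =>
        if pvCell st.2.2 i j = "T" then
          let res := pvLoop n m [(i, j)] st.2.2 0
          (st.1 + res.1, if res.1 > st.2.1 then res.1 else st.2.1, res.2)
        else st) := by
      funext st j
      by_cases hc : pvCell st.2.2 i j = "T"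
      · simp only [if_pos hc]
        have hb := pv_bridge n m (pvTcount st.2.2 + 1) i j st.2.2 [] 0 (Nat.lt_succ_self _)
        rw [pvLoop_nil] at hb
        rw [hb]
        simp only [zero_add]
      · simp only [if_neg hc]
    rw [hinner]
  rw [hstep]
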